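-- pv_equiv track=rewrite | github.com/jasii/srt-cleaner | app.py | join_wrapped_lines
-- ===== SOURCE A (Python) =====
-- def join_wrapped_lines(text):
--     # Join lines that don't end with period/question/exclamation marks
--     sentences = []
--     current = []
--
--     for line in text.split('\n'):
--         if not line.strip():
--             if current:
--                 sentences.append(' '.join(current))
--                 current = []
--             continue
--
--         if line.strip()[-1] in '.!?':
--             current.append(line.strip())
--             sentences.append(' '.join(current))
--             current = []
--         else:
--             current.append(line.strip())
--
--     if current:
--         sentences.append(' '.join(current))
--
--     return '\n'.join(sentences)
-- ===== SOURCE B (Python) =====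
-- def _emit_block(block):
--     # block: stripped non-blank lines; split into sentences at terminator-ending lines
--     sentences = []
--     buf = []
--     for s in block:
--         buf.append(s)
--         if s[-1] in '.!?':
--             sentences.append(' '.join(buf))
--             buf = []
--     if buf:
--         sentences.append(' '.join(buf))
--     return sentences
--
--
-- def join_wrapped_lines(text):
--     # Phase 1: partition into maximal runs of non-blank (stripped) lines.
--     blocks = []
--     block = []
--     for line in text.split('\n'):
--         s = line.strip()
--         if s:
--             block.append(s)
--         elif block:
--             blocks.append(block)
--             block = []
--     if block:
--         blocks.append(block)
--     # Phase 2: emit sentences block by block.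
--     sentences = []
--     for b in blocks:
--         sentences.extend(_emit_block(b))
--     return '\n'.join(sentences)
-- ===== Notes on version B (the rewrite author's own statement) =====
-- stated objective: alternative
-- what changed: Replaced the single flat loop with two flush conditions by a two-phase pipeline: first partition the stripped lines into maximal non-blank blocks, then emit sentences per block (flush at terminator-ending lines plus a leftover flush per block).
import Mathlib
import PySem

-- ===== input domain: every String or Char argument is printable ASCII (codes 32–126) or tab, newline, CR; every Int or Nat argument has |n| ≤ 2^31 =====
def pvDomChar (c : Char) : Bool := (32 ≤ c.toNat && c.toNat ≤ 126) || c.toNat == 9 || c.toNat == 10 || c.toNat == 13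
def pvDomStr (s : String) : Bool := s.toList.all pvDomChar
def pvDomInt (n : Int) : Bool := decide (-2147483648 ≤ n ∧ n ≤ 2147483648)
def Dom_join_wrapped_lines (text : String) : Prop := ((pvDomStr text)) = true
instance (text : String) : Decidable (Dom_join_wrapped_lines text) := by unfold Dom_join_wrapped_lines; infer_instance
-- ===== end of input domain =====

-- B replaces A's single flat loop (two flush conditions) by a two-phase pipeline:
-- partition into maximal non-blank blocks, then emit sentences per block. Return values agree; no side effects.

-- shared helper: Python's  s[-1] in '.!?'  (callers only pass non-empty s, so the none arm is unreachable)
def endsTerm (s : String) : Bool :=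
  match PySem.Str.pyGet? s (-1) with
  | some c => c == '.' || c == '!' || c == '?'
  | none => false

-- text.split('\n'): PySem.Str.split? is none only for sep = "", so .getD [] is exact here
def pyLines (text : String) : List String := (PySem.Str.split? text "\n").getD []

-- ===== PORT A =====
def join_wrapped_lines (text : String) : String :=
  let st :=
    (pyLines text).foldl
      (fun (st : List String × List String) line =>
        if PySem.Str.strip line = "" then
          (if st.2 ≠ [] then (st.1 ++ [PySem.Str.join " " st.2], []) else st)
        else if endsTerm (PySem.Str.strip line) then
          (st.1 ++ [PySem.Str.join " " (st.2 ++ [PySem.Str.strip line])], [])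
        else (st.1, st.2 ++ [PySem.Str.strip line]))
      ([], [])
  let sentences := if st.2 ≠ [] then st.1 ++ [PySem.Str.join " " st.2] else st.1
  PySem.Str.join "\n" sentences

-- ===== PORT B =====
def emitBlock (block : List String) : List String :=
  let st :=
    block.foldl
      (fun (st : List String × List String) s =>
        if endsTerm s then (st.1 ++ [PySem.Str.join " " (st.2 ++ [s])], [])
        else (st.1, st.2 ++ [s]))
      ([], [])
  if st.2 ≠ [] then st.1 ++ [PySem.Str.join " " st.2] else st.1

def join_wrapped_lines_alt (text : String) : String :=
  let st :=
    (pyLines text).foldl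
      (fun (st : List (List String) × List String) line =>
        if PySem.Str.strip line ≠ "" then (st.1, st.2 ++ [PySem.Str.strip line])
        else if st.2 ≠ [] then (st.1 ++ [st.2], []) else st)
      ([], [])
  let blocks := if st.2 ≠ [] then st.1 ++ [st.2] else st.1
  PySem.Str.join "\n" (blocks.foldl (fun sents b => sents ++ emitBlock b) [])

-- ===== PRECONDITION & SPEC =====
def Spec_join_wrapped_lines (text : String) (out : String) : Prop := out = join_wrapped_lines_alt text
instance (text : String) (out : String) : Decidable (Spec_join_wrapped_lines text out) := by unfold Spec_join_wrapped_lines; infer_instance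

-- ===== CLAIM (what is proved, stated in full; the proofs are below) =====
def Claim_equal_join_wrapped_lines : Prop := ∀ (text : String), Dom_join_wrapped_lines text → Spec_join_wrapped_lines text (join_wrapped_lines text)

-- ===== LEMMAS AND PROOFS =====

-- proof-side step functions over already-STRIPPED lines
def jsp (l : List String) : String := PySem.Str.join " " l

def fstepA (st : List String × List String) (s : String) : List String × List String :=
  if s = "" then (if st.2 ≠ [] then (st.1 ++ [jsp st.2], []) else st)
  else if endsTerm s then (st.1 ++ [jsp (st.2 ++ [s])], [])
  else (st.1, st.2 ++ [s])

def bstepP (st : List (List String) × List String) (s : String) : List (List String) × List String :=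
  if s ≠ "" then (st.1, st.2 ++ [s])
  else if st.2 ≠ [] then (st.1 ++ [st.2], []) else st

def estepP (st : List String × List String) (s : String) : List String × List String :=
  if endsTerm s then (st.1 ++ [jsp (st.2 ++ [s])], [])
  else (st.1, st.2 ++ [s])

def flushS (st : List String × List String) : List String :=
  if st.2 ≠ [] then st.1 ++ [jsp st.2] else st.1

-- the common recursive characterisation of the emitted sentence list
def fA : List String → List String → List String
  | [], cur => if cur ≠ [] then [jsp cur] else []
  | s :: rest, cur =>
    if s = "" then (if cur ≠ [] then [jsp cur] else []) ++ fA rest []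
    else if endsTerm s then jsp (cur ++ [s]) :: fA rest []
    else fA rest (cur ++ [s])

def eFold (block : List String) : List String × List String := block.foldl estepP ([], [])

def blist (L : List String) (block : List String) : List (List String) :=
  let st := L.foldl bstepP ([], block)
  if st.2 ≠ [] then st.1 ++ [st.2] else st.1

def bOut (L : List String) (block : List String) : List String :=
  (blist L block).flatMap emitBlock

-- step-value lemmas
lemma bstepP_blank_nil (blocks : List (List String)) : bstepP (blocks, []) "" = (blocks, []) := by
  simp [bstepP]

lemma bstepP_blank (blocks : List (List String)) (block : List String) (hb : block ≠ []) :
    bstepP (blocks, block) "" = (blocks ++ [block], []) := by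
  simp [bstepP, hb]

lemma bstepP_str (blocks : List (List String)) (block : List String) (s : String) (hs : s ≠ "") :
    bstepP (blocks, block) s = (blocks, block ++ [s]) := by
  simp [bstepP, hs]

lemma emitBlock_eq (block : List String) : emitBlock block = flushS (eFold block) := rfl

lemma A1 : ∀ (L : List String) (sents cur : List String),
    flushS (L.foldl fstepA (sents, cur)) = sents ++ fA L cur := by
  intro L
  induction L with
  | nil => intro sents cur; simp only [List.foldl_nil, flushS, fA]; split <;> simp
  | cons s rest ih =>
    intro sents cur
    simp only [List.foldl_cons, fA]
    by_cases hs : s = ""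
    · by_cases hc : cur = []
      · subst hc; simp [fstepA, hs, ih]
      · simp [fstepA, hs, hc, ih]
    · by_cases ht : endsTerm s <;> simp [fstepA, hs, ht, ih]

lemma Bprefix : ∀ (L : List String) (blocks : List (List String)) (block : List String),
    L.foldl bstepP (blocks, block) =
      (blocks ++ (L.foldl bstepP ([], block)).1, (L.foldl bstepP ([], block)).2) := by
  intro L
  induction L with
  | nil => intro blocks block; simp
  | cons s rest ih =>
    intro blocks block
    simp only [List.foldl_cons]
    by_cases hs : s = ""
    · subst hs
      by_cases hb : block = []
      · subst hb
        rw [bstepP_blank_nil, bstepP_blank_nil]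
        exact ih blocks []
      · rw [bstepP_blank blocks block hb, bstepP_blank [] block hb]
        simp only [List.nil_append]
        rw [ih (blocks ++ [block]) [], ih [block] []]
        simp
    · rw [bstepP_str blocks block s hs, bstepP_str [] block s hs]
      exact ih blocks (block ++ [s])

lemma blist_blank (rest : List String) (block : List String) (hb : block ≠ []) :
    blist ("" :: rest) block = block :: blist rest [] := by
  simp only [blist, List.foldl_cons, bstepP_blank [] block hb, List.nil_append]
  rw [Bprefix rest [block] []]
  split <;> simp

lemma eFold_concat (block : List String) (s : String) :
    eFold (block ++ [s]) = estepP (eFold block) s := by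
  simp [eFold]

lemma foldl_append_emit : ∀ (bs : List (List String)) (init : List String),
    bs.foldl (fun sents b => sents ++ emitBlock b) init = init ++ bs.flatMap emitBlock := by
  intro bs
  induction bs with
  | nil => simp
  | cons b rest ih => intro init; simp [ih]

lemma flush_split (st : List String × List String) :
    st.1 ++ (if st.2 ≠ [] then [jsp st.2] else []) = flushS st := by
  unfold flushS; split <;> simp

lemma M2 : ∀ (L : List String) (block : List String),
    (eFold block).1 ++ fA L (eFold block).2 = bOut L block := by
  intro L
  induction L with
  | nil =>
    intro block
    by_cases hb : block = []
    · subst hb; simp [bOut, blist, eFold, fA]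
    · simp only [bOut, blist, List.foldl_nil, if_pos hb, List.nil_append,
        List.flatMap_cons, List.flatMap_nil, List.append_nil, fA]
      rw [emitBlock_eq, ← flush_split]
  | cons s rest ih =>
    intro block
    by_cases hs : s = ""
    · subst hs
      have hrest : fA rest [] = bOut rest [] := by
        have h := ih []
        simpa [eFold] using h
      by_cases hb : block = []
      · subst hb
        have hbl : bOut ("" :: rest) [] = bOut rest [] := by
          simp [bOut, blist, List.foldl_cons, bstepP_blank_nil]
        rw [hbl, ← hrest]
        simp [eFold, fA]
      · rw [show fA ("" :: rest) (eFold block).2 =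
            (if (eFold block).2 ≠ [] then [jsp (eFold block).2] else []) ++ fA rest [] from by
              simp [fA]]
        rw [bOut, blist_blank rest block hb, List.flatMap_cons, emitBlock_eq,
          ← List.append_assoc, flush_split, hrest]
        rfl
    · have hstep : bOut (s :: rest) block = bOut rest (block ++ [s]) := by
        simp [bOut, blist, List.foldl_cons, bstepP_str [] block s hs]
      rw [hstep, ← ih (block ++ [s]), eFold_concat]
      by_cases ht : endsTerm s
      · simp [fA, hs, ht, estepP]
      · simp [fA, hs, ht, estepP]

lemma portA_eq (text : String) :
    join_wrapped_lines text =
      PySem.Str.join "\n" (fA ((pyLines text).map PySem.Str.strip) []) := by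
  rw [join_wrapped_lines]
  have h : (pyLines text).foldl
      (fun (st : List String × List String) line =>
        if PySem.Str.strip line = "" then
          (if st.2 ≠ [] then (st.1 ++ [PySem.Str.join " " st.2], []) else st)
        else if endsTerm (PySem.Str.strip line) then
          (st.1 ++ [PySem.Str.join " " (st.2 ++ [PySem.Str.strip line])], [])
        else (st.1, st.2 ++ [PySem.Str.strip line])) ([], [])
      = ((pyLines text).map PySem.Str.strip).foldl fstepA ([], []) := by
    rw [List.foldl_map]; rfl
  rw [h]
  have h2 := A1 ((pyLines text).map PySem.Str.strip) [] []
  simp only [flushS, jsp, List.nil_append] at h2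
  rw [h2]

lemma portB_eq (text : String) :
    join_wrapped_lines_alt text =
      PySem.Str.join "\n" (fA ((pyLines text).map PySem.Str.strip) []) := by
  rw [join_wrapped_lines_alt]
  have h : (pyLines text).foldl
      (fun (st : List (List String) × List String) line =>
        if PySem.Str.strip line ≠ "" then (st.1, st.2 ++ [PySem.Str.strip line])
        else if st.2 ≠ [] then (st.1 ++ [st.2], []) else st) ([], [])
      = ((pyLines text).map PySem.Str.strip).foldl bstepP ([], []) := by
    rw [List.foldl_map]; rfl
  rw [h]
  rw [foldl_append_emit]
  have hm := M2 ((pyLines text).map PySem.Str.strip) []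
  simp only [eFold, List.foldl_nil, List.nil_append] at hm
  rw [show ((if (((pyLines text).map PySem.Str.strip).foldl bstepP ([], [])).2 ≠ [] then
        (((pyLines text).map PySem.Str.strip).foldl bstepP ([], [])).1 ++
          [(((pyLines text).map PySem.Str.strip).foldl bstepP ([], [])).2]
      else (((pyLines text).map PySem.Str.strip).foldl bstepP ([], [])).1).flatMap emitBlock)
      = bOut ((pyLines text).map PySem.Str.strip) [] from rfl]
  rw [← hm]
  simp

-- ===== VERDICT (by name: the statement is the Claim_ definition above) =====
theorem join_wrapped_lines_spec : Claim_equal_join_wrapped_lines := by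
  intro text _
  unfold Spec_join_wrapped_lines
  rw [portA_eq, portB_eq]
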